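-- pv_equiv track=rewrite | github.com/fsengi/epcExercise | nn_from_scratch.py | MyNbitAdder
-- ===== SOURCE A (Python) =====
-- def ExactAdder(a, b, c):
--     if a==0 and b==0 and c==0:
--         s=0
--         c_out=0
--     elif a==0 and b==0 and c==1:
--         s=1
--         c_out=0
--     elif a==0 and b==1 and c==0:
--         s=1
--         c_out=0
--     elif a==0 and b==1 and c==1:
--         s=0
--         c_out=1
--     elif a==1 and b==0 and c==0:
--         s=1
--         c_out=0
--     elif a==1 and b==0 and c==1:
--         s=0
--         c_out=1
--     elif a==1 and b==1 and c==0: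
--         s=0
--         c_out=1
--     elif a==1 and b==1 and c==1:
--         s=1
--         c_out=1
--     return s, c_out
--
-- def ApproxAdder(a, b, c):
--     if a==0 and b==0 and c==0:
--         s=1
--         c_out=0
--     elif a==0 and b==0 and c==1:
--         s=1
--         c_out=0
--     elif a==0 and b==1 and c==0:
--         s=1
--         c_out=0
--     elif a==0 and b==1 and c==1:
--         s=0
--         c_out=1
--     elif a==1 and b==0 and c==0:
--         s=1
--         c_out=0
--     elif a==1 and b==0 and c==1:
--         s=0
--         c_out=1
--     elif a==1 and b==1 and c==0:
--         s=0
--         c_out=1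
--     elif a==1 and b==1 and c==1:
--         s=0
--         c_out=1
--     return s, c_out
--
-- def MyNbitAdder(a,b):
--     #convert to binary and cut off the first two indices (they dont belong to the number but indicate that it is binary)
--     a_bin, b_bin = bin(a)[2:] , bin(b)[2:]
--
--     #reverse order of bytes for the adder
--     rev_a , rev_b = list(a_bin[::-1]), list(b_bin[::-1])
--
--
--     #We want to make the to bytes to equalt length such that we can add
--     #--> add zeros to the shortest list until it is the same as the longest
--     rev_a = rev_a + max(0, len(rev_b)-len(rev_a)) * [0]
--     rev_b = rev_b + max(0, len(rev_a)-len(rev_b)) * [0]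
--
--
--     carry_over  = 0
--     total_sum   = 0
--
--     #############################################
--     approx_until = 4 #change this if u want to approximate the first bits by an approximate adder
--     #############################################
--
--     #we want to do a bitwise addition
--     count = 0
--     for index, (bit1, bit2) in enumerate( zip(rev_a, rev_b) ):
--         if index < approx_until:
--             #use approx_adder
--             sum_element, carry_over = ApproxAdder(int(bit1), int(bit2), int(carry_over) )
--             count = count + 1
--         else:
--             #use exact_adder
--             sum_element, carry_over = ExactAdder(int(bit1), int(bit2), int(carry_over) )
--             count = count + 1
--         total_sum += pow(2,index)*sum_element
--
--     total_sum += pow(2,index+1)*carry_over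
--     return total_sum, count
-- ===== SOURCE B (Python) =====
-- def MyNbitAdder(a, b):
--     # low min(count,4) bits simulated with the approximate rule, upper bits added in closed form
--     count = max(a.bit_length(), b.bit_length(), 1)
--     k = min(count, 4)
--     c = 0
--     low = 0
--     for i in range(k):
--         c = 1 if ((a >> i) & 1) + ((b >> i) & 1) + c >= 2 else 0
--         low += (1 - c) << i
--     return low + (((a >> k) + (b >> k) + c) << k), count
-- ===== Notes on version B (the rewrite author's own statement) =====
-- stated objective: faster
-- what changed: B drops the bin()-string round-trip, list padding and the bit-by-bit exact-adder loop over the high bits: it simulates only the low min(count,4) approximate bits and adds the bits above position 4 in closed form as integer arithmetic ((a>>k)+(b>>k)+carry)<<k.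
import Mathlib
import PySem

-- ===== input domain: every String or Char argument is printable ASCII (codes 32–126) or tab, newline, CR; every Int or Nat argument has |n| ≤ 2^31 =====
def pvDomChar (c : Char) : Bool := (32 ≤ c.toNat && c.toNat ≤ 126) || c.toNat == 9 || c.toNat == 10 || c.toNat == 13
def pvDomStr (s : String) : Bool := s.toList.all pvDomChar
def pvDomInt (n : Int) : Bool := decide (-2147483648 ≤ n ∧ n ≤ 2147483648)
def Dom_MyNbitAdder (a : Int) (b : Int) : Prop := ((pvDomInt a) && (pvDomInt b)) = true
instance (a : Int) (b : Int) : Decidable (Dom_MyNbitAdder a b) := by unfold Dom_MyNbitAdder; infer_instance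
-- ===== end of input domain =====

-- B replaces A's bit-by-bit exact-adder loop over the high bits (and the string round-trip
-- through bin()) by a closed-form arithmetic addition of the bits above position 4; only the
-- approximate low min(count,4) bits are simulated (a different algorithm; fewer per-bit steps).

-- ===== PORT A =====
-- A-side helpers: the two 1-bit adders, transliterated if-chains (the final elif becomes the
-- else branch: for non-bit inputs Python would fall through and raise NameError, unreachable here).
def ExactAdder (a : Int) (b : Int) (c : Int) : Int × Int :=
  if a = 0 ∧ b = 0 ∧ c = 0 then (0, 0)
  else if a = 0 ∧ b = 0 ∧ c = 1 then (1, 0)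
  else if a = 0 ∧ b = 1 ∧ c = 0 then (1, 0)
  else if a = 0 ∧ b = 1 ∧ c = 1 then (0, 1)
  else if a = 1 ∧ b = 0 ∧ c = 0 then (1, 0)
  else if a = 1 ∧ b = 0 ∧ c = 1 then (0, 1)
  else if a = 1 ∧ b = 1 ∧ c = 0 then (0, 1)
  else (1, 1)

def ApproxAdder (a : Int) (b : Int) (c : Int) : Int × Int :=
  if a = 0 ∧ b = 0 ∧ c = 0 then (1, 0)
  else if a = 0 ∧ b = 0 ∧ c = 1 then (1, 0)
  else if a = 0 ∧ b = 1 ∧ c = 0 then (1, 0)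
  else if a = 0 ∧ b = 1 ∧ c = 1 then (0, 1)
  else if a = 1 ∧ b = 0 ∧ c = 0 then (1, 0)
  else if a = 1 ∧ b = 0 ∧ c = 1 then (0, 1)
  else if a = 1 ∧ b = 1 ∧ c = 0 then (0, 1)
  else (0, 1)

-- bin(n)[2:] for n ≥ 0, as a list of chars (LSB-last, like Python's string).
-- For n < 0 Python's bin(a)[2:] contains the char 'b' and int('b') raises ValueError,
-- so negative inputs are excluded by Pre_ and this helper is only used on a.toNat / b.toNat.
def pvBinRev : Nat → List Char
  | 0 => []
  | n + 1 => (if (n + 1) % 2 = 1 then '1' else '0') :: pvBinRev ((n + 1) / 2)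
decreasing_by exact Nat.div_lt_self (Nat.succ_pos n) (by norm_num)

def pvBinChars (n : Nat) : List Char := if n = 0 then ['0'] else (pvBinRev n).reverse

-- int(x) for a list element: the chars '0'/'1' and the padding literal 0 all become the bit value.
def pvCharBit (c : Char) : Int := if c = '1' then 1 else 0

def MyNbitAdder (a : Int) (b : Int) : Int × Int :=
  let a_bin := pvBinChars a.toNat     -- bin(a)[2:] (a ≥ 0 under Pre_)
  let b_bin := pvBinChars b.toNat
  -- list(a_bin[::-1]); int() is applied here once per element instead of at each loop use-site
  let rev_a := a_bin.reverse.map pvCharBit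
  let rev_b := b_bin.reverse.map pvCharBit
  let rev_a := rev_a ++ List.replicate (max 0 ((rev_b.length : Int) - (rev_a.length : Int))).toNat 0
  let rev_b := rev_b ++ List.replicate (max 0 ((rev_a.length : Int) - (rev_b.length : Int))).toNat 0
  let st := (PySem.List.enumerate (rev_a.zip rev_b)).foldl
      (fun (st : Int × Int × Int) (p : Int × (Int × Int)) =>
        let sc := if p.1 < 4 then ApproxAdder p.2.1 p.2.2 st.1 else ExactAdder p.2.1 p.2.2 st.1
        (sc.2, st.2.1 + 2 ^ p.1.toNat * sc.1, st.2.2 + 1))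
      (0, 0, 0)
  -- total_sum += pow(2, index+1) * carry_over: the zip is never empty (bin strings have length ≥ 1),
  -- so Python's leftover `index` is zip-length − 1 and index+1 is the zip length.
  (st.2.1 + 2 ^ (rev_a.zip rev_b).length * st.1, st.2.2)

-- ===== PORT B =====
def MyNbitAdder_alt (a : Int) (b : Int) : Int × Int :=
  let count : Int := max (max ((PySem.Int.bitLength a : Int)) ((PySem.Int.bitLength b : Int))) 1
  let k : Int := min count 4
  let st := (PySem.List.pyRange 0 k 1).foldl
      (fun (st : Int × Int) (i : Int) =>
        let c := if PySem.Int.band (a >>> i.toNat) 1 + PySem.Int.band (b >>> i.toNat) 1 + st.1 ≥ 2 then (1 : Int) else 0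
        (c, st.2 + (1 - c) <<< i.toNat))
      (0, 0)
  (st.2 + ((a >>> k.toNat) + (b >>> k.toNat) + st.1) <<< k.toNat, count)

-- ===== PRECONDITION & SPEC =====
-- Pre_ excludes negative inputs: there bin(a)[2:] contains the char 'b' and A raises ValueError.
def Pre_MyNbitAdder (a : Int) (b : Int) : Prop := 0 ≤ a ∧ 0 ≤ b
instance (a : Int) (b : Int) : Decidable (Pre_MyNbitAdder a b) := by unfold Pre_MyNbitAdder; infer_instance
def pvWitness_MyNbitAdder : Int × Int := (6, 3)

def Spec_MyNbitAdder (a : Int) (b : Int) (out : Int × Int) : Prop := out = MyNbitAdder_alt a b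
instance (a : Int) (b : Int) (out : Int × Int) : Decidable (Spec_MyNbitAdder a b out) := by unfold Spec_MyNbitAdder; infer_instance

-- ===== CLAIM (what is proved, stated in full; the proofs are below) =====
def Claim_equal_MyNbitAdder : Prop := ∀ (a : Int) (b : Int), Dom_MyNbitAdder a b → Pre_MyNbitAdder a b → Spec_MyNbitAdder a b (MyNbitAdder a b)

-- ===== LEMMAS AND PROOFS =====

def pvBitI (m i : Nat) : Int := ((m / 2 ^ i % 2 : Nat) : Int)

def pvBits (m : Nat) : List Int := (pvBinRev m).map pvCharBit

def pvL (m n : Nat) : Nat := max (max (PySem.Int.bitLength (m : Int)) (PySem.Int.bitLength (n : Int))) 1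

def pvPairs (m n : Nat) : List (Int × Int) := (List.range (pvL m n)).map (fun i => (pvBitI m i, pvBitI n i))

def pvVal : List Int → Int
  | [] => 0
  | x :: t => x + 2 * pvVal t

def pvPhase : List (Int × Int) → Nat → Int → Int × Int
  | [], _, c => (0, c)
  | (x, y) :: t, j, c =>
    let sc := if (j : Int) < 4 then ApproxAdder x y c else ExactAdder x y c
    let r := pvPhase t (j + 1) sc.2
    (2 ^ j * sc.1 + r.1, r.2)

lemma pvBinRev_pos (m : Nat) (h : 0 < m) :
    pvBinRev m = (if m % 2 = 1 then '1' else '0') :: pvBinRev (m / 2) := by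
  cases m with
  | zero => omega
  | succ n => rw [pvBinRev]

lemma pvBits_pos (m : Nat) (h : 0 < m) : pvBits m = ((m % 2 : Nat) : Int) :: pvBits (m / 2) := by
  unfold pvBits
  rw [pvBinRev_pos m h]
  rcases Nat.mod_two_eq_zero_or_one m with h2 | h2 <;> simp [h2, pvCharBit]

lemma pvBits_length (m : Nat) : (pvBits m).length = PySem.Int.bitLength (m : Int) := by
  induction m using Nat.strong_induction_on with
  | _ m ih =>
    rcases Nat.eq_zero_or_pos m with rfl | hm
    · simp [pvBits, pvBinRev]
    · rw [pvBits_pos m hm, PySem.Int.bitLength_natCast hm]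
      simp [ih (m / 2) (Nat.div_lt_self hm (by norm_num))]

lemma pvBitLength_pos (m : Nat) (h : 0 < m) : 1 ≤ PySem.Int.bitLength (m : Int) := by
  rw [PySem.Int.bitLength_natCast h]; omega

lemma pvRevMap (m : Nat) :
    (pvBinChars m).reverse.map pvCharBit = if m = 0 then [(0 : Int)] else pvBits m := by
  rcases Nat.eq_zero_or_pos m with rfl | hm
  · simp [pvBinChars, pvCharBit]
  · rw [if_neg (by omega : m ≠ 0)]
    rw [pvBinChars, if_neg (by omega : m ≠ 0), List.reverse_reverse, pvBits]

lemma pvBinChars_length (m : Nat) :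
    ((pvBinChars m).reverse.map pvCharBit).length = max (PySem.Int.bitLength (m : Int)) 1 := by
  rw [pvRevMap]
  rcases Nat.eq_zero_or_pos m with rfl | hm
  · simp
  · rw [if_neg (by omega : m ≠ 0), pvBits_length]
    have := pvBitLength_pos m hm
    omega

lemma pvPad_eq (L : Nat) : ∀ (m : Nat), (pvBits m).length ≤ L →
    pvBits m ++ List.replicate (L - (pvBits m).length) 0
      = (List.range L).map (fun i => pvBitI m i) := by
  induction L with
  | zero =>
    intro m h
    have h0 : pvBits m = [] := List.eq_nil_of_length_eq_zero (Nat.le_zero.mp h)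
    simp [h0]
  | succ L ih =>
    intro m h
    rcases Nat.eq_zero_or_pos m with rfl | hm
    · have h0 : pvBits 0 = [] := by simp [pvBits, pvBinRev]
      rw [h0]
      simp only [List.nil_append, List.length_nil, Nat.sub_zero]
      symm
      rw [List.eq_replicate_iff]
      refine ⟨by simp, ?_⟩
      intro x hx
      simp only [List.mem_map] at hx
      obtain ⟨i, _, rfl⟩ := hx
      simp [pvBitI]
    · rw [pvBits_pos m hm] at h ⊢
      simp only [List.length_cons] at h ⊢
      have h2 : (pvBits (m / 2)).length ≤ L := by omega
      have htail : (List.range L).map (fun i => pvBitI m (i + 1)) = (List.range L).map (fun i => pvBitI (m / 2) i) := by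
        apply List.map_congr_left
        intro i _
        unfold pvBitI
        congr 2
        rw [pow_succ, Nat.mul_comm, ← Nat.div_div_eq_div_mul]
      rw [List.range_succ_eq_map, List.map_cons, List.map_map]
      have : (fun i => pvBitI m i) ∘ Nat.succ = fun i => pvBitI m (i + 1) := rfl
      rw [this, htail, Nat.succ_sub_succ, List.cons_append, ih (m / 2) h2]
      congr 1
      simp [pvBitI]

lemma pvRevPad (m L : Nat) (h : max (PySem.Int.bitLength (m : Int)) 1 ≤ L) :
    (pvBinChars m).reverse.map pvCharBit
      ++ List.replicate (L - max (PySem.Int.bitLength (m : Int)) 1) 0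
      = (List.range L).map (fun i => pvBitI m i) := by
  rw [pvRevMap]
  rcases Nat.eq_zero_or_pos m with rfl | hm
  · rw [if_pos rfl]
    have hL : 1 ≤ L := le_trans (le_max_right _ 1) h
    have hz : PySem.Int.bitLength ((0 : Nat) : Int) = 0 := by simp
    rw [hz]
    have hb : pvBits 0 = [] := by simp [pvBits, pvBinRev]
    have hp := pvPad_eq L 0 (by simp [hb])
    rw [hb, List.nil_append, List.length_nil, Nat.sub_zero] at hp
    rw [← hp, show max 0 1 = 1 from rfl,
        show L = 1 + (L - 1) from by omega, List.replicate_add]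
    simp
  · rw [if_neg (by omega : m ≠ 0)]
    have hmax : max (PySem.Int.bitLength (m : Int)) 1 = (pvBits m).length := by
      rw [pvBits_length]; have := pvBitLength_pos m hm; omega
    rw [hmax, pvPad_eq L m (by omega)]

def pvK (m n : Nat) : Nat := min (pvL m n) 4

lemma pvBitI_bit (m i : Nat) : pvBitI m i = 0 ∨ pvBitI m i = 1 := by
  unfold pvBitI
  have := Nat.mod_lt (m / 2 ^ i) (show 0 < 2 from by norm_num)
  omega

lemma pvApproxAdder_eq (x y c : Int) (hx : x = 0 ∨ x = 1) (hy : y = 0 ∨ y = 1) (hc : c = 0 ∨ c = 1) :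
    ApproxAdder x y c
      = (1 - (if 2 ≤ x + y + c then (1 : Int) else 0), if 2 ≤ x + y + c then (1 : Int) else 0) := by
  rcases hx with rfl | rfl <;> rcases hy with rfl | rfl <;> rcases hc with rfl | rfl <;> decide

lemma pvExactAdder_spec (x y c : Int) (hx : x = 0 ∨ x = 1) (hy : y = 0 ∨ y = 1) (hc : c = 0 ∨ c = 1) :
    (ExactAdder x y c).1 + 2 * (ExactAdder x y c).2 = x + y + c
      ∧ ((ExactAdder x y c).2 = 0 ∨ (ExactAdder x y c).2 = 1) := by
  rcases hx with rfl | rfl <;> rcases hy with rfl | rfl <;> rcases hc with rfl | rfl <;> decide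

lemma pvAdder_carry_bit (x y c : Int) (hx : x = 0 ∨ x = 1) (hy : y = 0 ∨ y = 1) (hc : c = 0 ∨ c = 1) :
    ((ApproxAdder x y c).2 = 0 ∨ (ApproxAdder x y c).2 = 1)
      ∧ ((ExactAdder x y c).2 = 0 ∨ (ExactAdder x y c).2 = 1) := by
  rcases hx with rfl | rfl <;> rcases hy with rfl | rfl <;> rcases hc with rfl | rfl <;> decide

lemma pvPhase_carry (t : List (Int × Int)) : ∀ (j : Nat) (c : Int),
    (∀ p ∈ t, (p.1 = 0 ∨ p.1 = 1) ∧ (p.2 = 0 ∨ p.2 = 1)) → (c = 0 ∨ c = 1) →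
    ((pvPhase t j c).2 = 0 ∨ (pvPhase t j c).2 = 1) := by
  induction t with
  | nil => intro j c _ hc; simpa [pvPhase] using hc
  | cons p t ih =>
    intro j c hb hc
    obtain ⟨x, y⟩ := p
    have hxy := hb (x, y) (List.mem_cons_self ..)
    have hcar := pvAdder_carry_bit x y c hxy.1 hxy.2 hc
    simp only [pvPhase]
    split
    · exact ih (j + 1) _ (fun q hq => hb q (List.mem_cons_of_mem _ hq)) hcar.1
    · exact ih (j + 1) _ (fun q hq => hb q (List.mem_cons_of_mem _ hq)) hcar.2

lemma pvFoldA (ps : List (Int × Int)) : ∀ (j : Nat) (carry total count : Int),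
    (PySem.List.enumerate ps ((j : Nat) : Int)).foldl
      (fun (st : Int × Int × Int) (p : Int × (Int × Int)) =>
        ((if p.1 < 4 then ApproxAdder p.2.1 p.2.2 st.1 else ExactAdder p.2.1 p.2.2 st.1).2,
         st.2.1 + 2 ^ p.1.toNat * (if p.1 < 4 then ApproxAdder p.2.1 p.2.2 st.1 else ExactAdder p.2.1 p.2.2 st.1).1,
         st.2.2 + 1)) (carry, total, count)
    = ((pvPhase ps j carry).2, total + (pvPhase ps j carry).1, count + ps.length) := by
  induction ps with
  | nil => intro j carry total count; simp [PySem.List.enumerate, pvPhase]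
  | cons p t ih =>
    intro j carry total count
    obtain ⟨x, y⟩ := p
    rw [PySem.List.enumerate_cons, List.foldl_cons]
    have hj1 : ((j : Nat) : Int) + 1 = (((j + 1 : Nat)) : Int) := by push_cast; ring
    simp only [hj1, Int.toNat_natCast]
    rw [ih (j + 1)]
    simp only [pvPhase, List.length_cons]
    refine Prod.ext rfl (Prod.ext ?_ ?_)
    · simp; ring
    · simp; ring

lemma pvPhase_append (l t : List (Int × Int)) : ∀ (j : Nat) (c : Int),
    pvPhase (l ++ t) j c
      = ((pvPhase l j c).1 + (pvPhase t (j + l.length) (pvPhase l j c).2).1,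
         (pvPhase t (j + l.length) (pvPhase l j c).2).2) := by
  induction l with
  | nil => intro j c; simp [pvPhase]
  | cons p l ih =>
    intro j c
    obtain ⟨x, y⟩ := p
    simp only [List.cons_append, pvPhase, List.length_cons, ih (j + 1)]
    refine Prod.ext ?_ ?_ <;> simp [Nat.add_comm, add_assoc]

lemma pvExactPhase (t : List (Int × Int)) : ∀ (j : Nat) (c : Int), 4 ≤ j →
    (∀ p ∈ t, (p.1 = 0 ∨ p.1 = 1) ∧ (p.2 = 0 ∨ p.2 = 1)) → (c = 0 ∨ c = 1) →
    (pvPhase t j c).1 + 2 ^ (j + t.length) * (pvPhase t j c).2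
      = 2 ^ j * (pvVal (t.map Prod.fst) + pvVal (t.map Prod.snd) + c) := by
  induction t with
  | nil => intro j c _ _ _; simp [pvPhase, pvVal]
  | cons p t ih =>
    intro j c hj hb hc
    obtain ⟨x, y⟩ := p
    have hxy := hb (x, y) (List.mem_cons_self ..)
    have hnot : ¬ ((j : Nat) : Int) < 4 := by omega
    have hspec := pvExactAdder_spec x y c hxy.1 hxy.2 hc
    simp only [pvPhase, if_neg hnot, List.map_cons, pvVal, List.length_cons]
    have hih := ih (j + 1) (ExactAdder x y c).2 (by omega)
      (fun q hq => hb q (List.mem_cons_of_mem _ hq)) hspec.2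
    rw [show j + (t.length + 1) = (j + 1) + t.length from by omega]
    linear_combination hih + (2 : Int) ^ j * hspec.1

lemma pvValBits (d : Nat) : ∀ (m j : Nat), m < 2 ^ (j + d) →
    pvVal ((List.range d).map (fun i => pvBitI m (j + i))) = ((m / 2 ^ j : Nat) : Int) := by
  induction d with
  | zero =>
    intro m j h
    rw [Nat.add_zero] at h
    simp [pvVal, Nat.div_eq_of_lt h]
  | succ d ih =>
    intro m j h
    rw [List.range_succ_eq_map, List.map_cons, List.map_map]
    have hcomp : ((fun i => pvBitI m (j + i)) ∘ Nat.succ) = fun i => pvBitI m ((j + 1) + i) := by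
      funext i; simp [Function.comp, Nat.add_comm, Nat.add_left_comm]
    rw [hcomp]
    simp only [pvVal, Nat.add_zero]
    rw [ih m (j + 1) (by rw [show j + 1 + d = j + (d + 1) from by omega]; exact h)]
    unfold pvBitI
    have hdd : m / 2 ^ (j + 1) = m / 2 ^ j / 2 := by
      rw [pow_succ, ← Nat.div_div_eq_div_mul]
    rw [hdd]
    omega

lemma pvA_char (m n : Nat) :
    MyNbitAdder (m : Int) (n : Int)
      = ((pvPhase (pvPairs m n) 0 0).1 + 2 ^ (pvL m n) * (pvPhase (pvPairs m n) 0 0).2,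
         ((pvL m n : Nat) : Int)) := by
  simp only [MyNbitAdder, Int.toNat_natCast]
  set ra := (pvBinChars m).reverse.map pvCharBit with hra
  set rb := (pvBinChars n).reverse.map pvCharBit with hrb
  have hla : ra.length = max (PySem.Int.bitLength (m : Int)) 1 := pvBinChars_length m
  have hlb : rb.length = max (PySem.Int.bitLength (n : Int)) 1 := pvBinChars_length n
  set L := pvL m n with hL
  have hLa : ra.length ≤ L ∧ rb.length ≤ L ∧ max ra.length rb.length = L := by
    rw [hla, hlb, hL]; unfold pvL; omega
  -- first pad
  have hpad1 : (max 0 ((rb.length : Int) - (ra.length : Int))).toNat = L - ra.length := by omega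
  rw [hpad1]
  have h1 : ra ++ List.replicate (L - ra.length) 0 = (List.range L).map (fun i => pvBitI m i) := by
    rw [hra, hla]
    exact pvRevPad m L (by omega)
  rw [h1]
  have hlen1 : ((List.range L).map (fun i => pvBitI m i)).length = L := by simp
  rw [hlen1]
  have hpad2 : (max 0 ((L : Int) - (rb.length : Int))).toNat = L - rb.length := by omega
  rw [hpad2]
  have h2 : rb ++ List.replicate (L - rb.length) 0 = (List.range L).map (fun i => pvBitI n i) := by
    rw [hrb, hlb]
    exact pvRevPad n L (by omega)
  rw [h2]
  rw [List.zip_map']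
  have hz : (List.range L).map (fun i => ((fun i => pvBitI m i) i, (fun i => pvBitI n i) i)) = pvPairs m n := rfl
  rw [hz]
  have hf := pvFoldA (pvPairs m n) 0 0 0 0
  rw [Nat.cast_zero] at hf
  rw [hf]
  have hlp : (pvPairs m n).length = L := by simp [pvPairs, hL]
  rw [hlp]
  simp

lemma pvBandBit (m i : Nat) : PySem.Int.band ((m : Int) >>> i) 1 = pvBitI m i := by
  rw [← Int.natCast_shiftRight, show (1 : Int) = ((1 : Nat) : Int) from rfl, PySem.Int.band_natCast,
    Nat.and_one_is_mod, Nat.shiftRight_eq_div_pow]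
  rfl

lemma pvLowFold (g1 g2 : Nat → Int) (hg1 : ∀ i, g1 i = 0 ∨ g1 i = 1) (hg2 : ∀ i, g2 i = 0 ∨ g2 i = 1) :
    ∀ (K j : Nat) (c low : Int), j + K ≤ 4 → (c = 0 ∨ c = 1) →
    (PySem.List.pyRange (j : Int) ((j : Int) + (K : Int)) 1).foldl
      (fun (st : Int × Int) (i : Int) =>
        ((if g1 i.toNat + g2 i.toNat + st.1 ≥ 2 then (1 : Int) else 0),
         st.2 + (1 - (if g1 i.toNat + g2 i.toNat + st.1 ≥ 2 then (1 : Int) else 0)) <<< i.toNat))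
      (c, low)
    = ((pvPhase ((List.range K).map (fun i => (g1 (j + i), g2 (j + i)))) j c).2,
       low + (pvPhase ((List.range K).map (fun i => (g1 (j + i), g2 (j + i)))) j c).1) := by
  intro K
  induction K with
  | zero =>
    intro j c low _ _
    rw [show ((j : Int) + ((0 : Nat) : Int)) = (j : Int) from by push_cast; ring,
      PySem.List.pyRange_one_eq_nil (le_refl _)]
    simp [pvPhase]
  | succ K ih =>
    intro j c low hj hc
    rw [PySem.List.pyRange_one_cons (by push_cast; omega), List.foldl_cons]
    rw [show ((j : Int) + 1) = (((j + 1 : Nat)) : Int) from by push_cast; ring]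
    rw [show ((j : Int) + ((K + 1 : Nat) : Int)) = (((j + 1 : Nat)) : Int) + ((K : Nat) : Int) from by push_cast; ring]
    simp only [Int.toNat_natCast]
    have htbit : (if g1 j + g2 j + c ≥ 2 then (1 : Int) else 0) = 0 ∨ (if g1 j + g2 j + c ≥ 2 then (1 : Int) else 0) = 1 := by
      split <;> simp
    refine Eq.trans (ih (j + 1) _ _ (by omega) htbit) ?_
    rw [List.range_succ_eq_map, List.map_cons, List.map_map]
    have hcomp : ((fun i => (g1 (j + i), g2 (j + i))) ∘ Nat.succ)
        = fun i => (g1 ((j + 1) + i), g2 ((j + 1) + i)) := by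
      funext i; simp [Function.comp, Nat.add_comm, Nat.add_left_comm]
    rw [hcomp]
    simp only [pvPhase, if_pos (show ((j : Nat) : Int) < 4 by omega),
      pvApproxAdder_eq (g1 j) (g2 j) c (hg1 j) (hg2 j) hc, Nat.add_zero]
    refine Prod.ext ?_ ?_
    · simp only [ge_iff_le]
    · simp only [ge_iff_le, Int.shiftLeft_eq]; ring

def pvLow (m n : Nat) : List (Int × Int) := (List.range (pvK m n)).map (fun i => (pvBitI m i, pvBitI n i))

lemma pvB_char (m n : Nat) :
    MyNbitAdder_alt (m : Int) (n : Int)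
      = ((pvPhase (pvLow m n) 0 0).1
          + (((m / 2 ^ pvK m n : Nat) : Int) + ((n / 2 ^ pvK m n : Nat) : Int)
             + (pvPhase (pvLow m n) 0 0).2) * 2 ^ pvK m n,
         ((pvL m n : Nat) : Int)) := by
  simp only [MyNbitAdder_alt]
  have hcount : max (max ((PySem.Int.bitLength ((m : Int)) : Nat) : Int) ((PySem.Int.bitLength ((n : Int)) : Nat) : Int)) 1
      = ((pvL m n : Nat) : Int) := by
    unfold pvL; push_cast; omega
  rw [hcount]
  have hk : min ((pvL m n : Nat) : Int) 4 = ((pvK m n : Nat) : Int) := by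
    unfold pvK; push_cast; omega
  rw [hk]
  simp only [pvBandBit, Int.toNat_natCast]
  have hl := pvLowFold (fun i => pvBitI m i) (fun i => pvBitI n i)
    (fun i => pvBitI_bit m i) (fun i => pvBitI_bit n i) (pvK m n) 0 0 0
    (by unfold pvK; omega) (Or.inl rfl)
  simp only [Nat.cast_zero, zero_add] at hl
  rw [hl]
  have hsh : ∀ (p : Nat), ((p : Int) >>> pvK m n) = ((p / 2 ^ pvK m n : Nat) : Int) := by
    intro p
    rw [← Int.natCast_shiftRight, Nat.shiftRight_eq_div_pow]
  rw [hsh m, hsh n]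
  refine Prod.ext ?_ rfl
  simp only [Int.shiftLeft_eq, pvLow]

lemma pvPairs_split (m n : Nat) :
    pvPairs m n = pvLow m n
      ++ (List.range (pvL m n - pvK m n)).map (fun i => (pvBitI m (pvK m n + i), pvBitI n (pvK m n + i))) := by
  unfold pvPairs pvLow
  conv_lhs => rw [show pvL m n = pvK m n + (pvL m n - pvK m n) from by unfold pvK; omega,
    List.range_add, List.map_append, List.map_map]
  rfl

lemma pvLt_two_pow (m n p : Nat) (h : PySem.Int.bitLength (p : Int) ≤ pvL m n) : p < 2 ^ pvL m n := by
  refine lt_of_lt_of_le ?_ (Nat.pow_le_pow_right (by norm_num) h)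
  simpa using PySem.Int.lt_two_pow_bitLength (p : Int)

lemma pvMain (m n : Nat) : MyNbitAdder (m : Int) (n : Int) = MyNbitAdder_alt (m : Int) (n : Int) := by
  rw [pvA_char, pvB_char]
  refine Prod.ext ?_ rfl
  simp only []
  set L := pvL m n with hLdef
  set K := pvK m n with hKdef
  have hKL : K ≤ L := min_le_left _ _
  have hK4 : K ≤ 4 := min_le_right _ _
  have hm2 : m < 2 ^ L := pvLt_two_pow m n m (by unfold pvL; omega)
  have hn2 : n < 2 ^ L := pvLt_two_pow m n n (by unfold pvL; omega)
  have hbits : ∀ p ∈ (List.range (L - K)).map (fun i => (pvBitI m (K + i), pvBitI n (K + i))),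
      (p.1 = 0 ∨ p.1 = 1) ∧ (p.2 = 0 ∨ p.2 = 1) := by
    intro p hp
    simp only [List.mem_map] at hp
    obtain ⟨i, _, rfl⟩ := hp
    exact ⟨pvBitI_bit m _, pvBitI_bit n _⟩
  have hlowbits : ∀ p ∈ pvLow m n, (p.1 = 0 ∨ p.1 = 1) ∧ (p.2 = 0 ∨ p.2 = 1) := by
    intro p hp
    simp only [pvLow, List.mem_map] at hp
    obtain ⟨i, _, rfl⟩ := hp
    exact ⟨pvBitI_bit m _, pvBitI_bit n _⟩
  have hcarry : (pvPhase (pvLow m n) 0 0).2 = 0 ∨ (pvPhase (pvLow m n) 0 0).2 = 1 :=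
    pvPhase_carry (pvLow m n) 0 0 hlowbits (Or.inl rfl)
  have hlen : (pvLow m n).length = K := by simp [pvLow, hKdef]
  rw [pvPairs_split m n, pvPhase_append, hlen]
  by_cases hL4 : L ≤ 4
  · have hKLeq : K = L := by rw [hKdef, hLdef]; unfold pvK; omega
    have hhigh : L - K = 0 := by omega
    rw [hhigh]
    simp only [List.range_zero, List.map_nil, pvPhase, Nat.zero_add]
    have hmd : m / 2 ^ K = 0 := Nat.div_eq_of_lt (by rw [hKLeq]; exact hm2)
    have hnd : n / 2 ^ K = 0 := Nat.div_eq_of_lt (by rw [hKLeq]; exact hn2)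
    rw [hmd, hnd, hKLeq]
    push_cast
    ring
  · have hKeq : K = 4 := by rw [hKdef, hLdef] at *; unfold pvK at *; omega
    have hex := pvExactPhase ((List.range (L - K)).map (fun i => (pvBitI m (K + i), pvBitI n (K + i))))
      (0 + K) (pvPhase (pvLow m n) 0 0).2 (by omega) hbits hcarry
    have hlen2 : ((List.range (L - K)).map (fun i => (pvBitI m (K + i), pvBitI n (K + i)))).length = L - K := by simp
    rw [hlen2, show (0 + K) + (L - K) = L from by omega] at hex
    have hvm : pvVal (((List.range (L - K)).map (fun i => (pvBitI m (K + i), pvBitI n (K + i)))).map Prod.fst)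
        = ((m / 2 ^ K : Nat) : Int) := by
      rw [List.map_map, show (Prod.fst ∘ fun i => (pvBitI m (K + i), pvBitI n (K + i))) = fun i => pvBitI m (K + i) from rfl]
      exact pvValBits (L - K) m K (by rw [show K + (L - K) = L from by omega]; exact hm2)
    have hvn : pvVal (((List.range (L - K)).map (fun i => (pvBitI m (K + i), pvBitI n (K + i)))).map Prod.snd)
        = ((n / 2 ^ K : Nat) : Int) := by
      rw [List.map_map, show (Prod.snd ∘ fun i => (pvBitI m (K + i), pvBitI n (K + i))) = fun i => pvBitI n (K + i) from rfl]
      exact pvValBits (L - K) n K (by rw [show K + (L - K) = L from by omega]; exact hn2)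
    rw [hvm, hvn] at hex
    linear_combination hex

-- ===== VERDICT (by name: the statement is the Claim_ definition above) =====
theorem MyNbitAdder_spec : Claim_equal_MyNbitAdder := by
  intro a b _ hpre
  obtain ⟨m, rfl⟩ : ∃ m : Nat, a = (m : Int) := ⟨a.toNat, (Int.toNat_of_nonneg hpre.1).symm⟩
  obtain ⟨n, rfl⟩ : ∃ n : Nat, b = (n : Int) := ⟨b.toNat, (Int.toNat_of_nonneg hpre.2).symm⟩
  unfold Spec_MyNbitAdder
  exact pvMain m n
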